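-- pv_equiv track=rewrite | github.com/merryshalabi/PythonKatasFursa | katas/is_valid_git_tree.py | is_valid_git_tree
-- ===== SOURCE A (Python) =====
-- def is_valid_git_tree(tree_map):
--     """
--     Determines if a given tree structure represents a valid Git tree.
--
--     A valid Git tree should:
--     1. Have exactly one root (no parent).
--     2. Contain no cycles.
--
--     Args:
--         tree_map: a dictionary representing the Git tree (commit ID to list of child commit IDs)
--
--     Returns:
--         True if the tree is a valid Git tree, False otherwise
--     """
--     all_nodes = set(tree_map.keys())
--     all_child_nodes = set()
--
--     for children in tree_map.values():
--         for child in children: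
--             all_child_nodes.add(child)
--
--     root = all_nodes - all_child_nodes
--     if len(root) != 1 :
--         return False
--
--     start = root.pop()
--
--     global_visited = set()
--
--     def dfs(node,visited):
--         if node in visited:
--             return False
--         if node in global_visited:
--             return True
--         visited.add(node)
--
--         for child in tree_map.get(node,[]):
--             if child in visited:
--                 return False
--             else:
--                 dfs(node,visited)
--
--         visited.remove(node)
--         global_visited.add(node)
--         return True
--
--     visited = set()
--     if not dfs(start,visited):
--         return False
--
--
--     return True
-- ===== SOURCE B (Python) =====
-- def is_valid_git_tree(tree_map):
--     children = {c for cs in tree_map.values() for c in cs}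
--     return sum(1 for k in tree_map if k not in children) == 1
-- ===== Notes on version B (the rewrite author's own statement) =====
-- stated objective: simpler
-- what changed: B drops A's set-difference-plus-DFS entirely: A's DFS is a no-op (it recurses on `node`, not `child`, so it always succeeds once a unique root exists, since a root is never its own child), so B just counts the keys that appear in no child list and returns whether that count is 1.
import Mathlib
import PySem

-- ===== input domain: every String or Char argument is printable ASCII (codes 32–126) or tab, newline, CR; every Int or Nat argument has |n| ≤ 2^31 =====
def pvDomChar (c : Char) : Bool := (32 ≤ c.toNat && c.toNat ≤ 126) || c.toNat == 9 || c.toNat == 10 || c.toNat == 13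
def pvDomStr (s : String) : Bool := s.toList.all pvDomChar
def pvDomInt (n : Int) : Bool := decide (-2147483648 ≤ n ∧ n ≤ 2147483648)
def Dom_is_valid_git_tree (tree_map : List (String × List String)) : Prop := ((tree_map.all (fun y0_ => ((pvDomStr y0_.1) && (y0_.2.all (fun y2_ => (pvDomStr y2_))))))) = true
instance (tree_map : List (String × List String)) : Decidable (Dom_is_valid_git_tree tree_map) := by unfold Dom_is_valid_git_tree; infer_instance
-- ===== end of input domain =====

-- B replaces A's set-difference-plus-no-op-DFS (A's dfs recurses on `node`, not `child`,
-- so it always succeeds once a unique root exists) by a single count of the keys that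
-- appear in no child list; objective: simpler.

-- ===== PORT A =====
-- A's inner `dfs(node, visited)` (mutates `visited`/`global_visited` in place): ported with
-- explicit state threading and a fuel argument for termination; fuel tree_map.length + 1
-- is never exhausted because the recursive call returns at once (node ∈ visited).
mutual
def pvDfsA (d : PySem.Dict String (List String)) :
    Nat → String → PySem.Set String → PySem.Set String →
    Bool × PySem.Set String × PySem.Set String
  | 0, _, visited, gv => (false, visited, gv)
  | fuel+1, node, visited, gv =>
    if PySem.Set.contains visited node then (false, visited, gv)
    else if PySem.Set.contains gv node then (true, visited, gv)
    else
      let visited1 := PySem.Set.add visited node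
      match pvDfsLoopA d fuel node (PySem.Dict.getD d node []) visited1 gv with
      | (some r, v, g) => (r, v, g)                        -- early `return False` in the loop
      | (none, v, g) =>
          (true, (PySem.Set.remove? v node).getD v, PySem.Set.add g node)
termination_by fuel _ _ _ => (fuel, 0)

-- the `for child in tree_map.get(node, [])` loop; `some r` = early return from dfs
def pvDfsLoopA (d : PySem.Dict String (List String)) (fuel : Nat) (node : String) :
    List String → PySem.Set String → PySem.Set String →
    Option Bool × PySem.Set String × PySem.Set String
  | [], visited, gv => (none, visited, gv)
  | _c :: cs, visited, gv =>
    if PySem.Set.contains visited _c then (some false, visited, gv)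
    else
      let r := pvDfsA d fuel node visited gv               -- result ignored, as in A
      pvDfsLoopA d fuel node cs r.2.1 r.2.2
termination_by children _ _ => (fuel, children.length + 1)
end

def is_valid_git_tree (tree_map : List (String × List String)) : Bool :=
  let d := PySem.Dict.ofList tree_map
  let all_nodes := PySem.Set.ofList (PySem.Dict.keys d)
  let all_child_nodes :=
    (PySem.Dict.values d).foldl (fun s children => children.foldl PySem.Set.add s) PySem.Set.empty
  let root := PySem.Set.diff all_nodes all_child_nodes
  if PySem.Set.len root != 1 then false
  else
    match root with
    | start :: _ =>                                        -- root.pop() on the singleton set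
        let r := pvDfsA d (tree_map.length + 1) start PySem.Set.empty PySem.Set.empty
        if !r.1 then false else true
    | [] => false                                          -- unreachable: len root = 1

-- ===== PORT B =====
def is_valid_git_tree_alt (tree_map : List (String × List String)) : Bool :=
  let d := PySem.Dict.ofList tree_map
  let children := PySem.Set.ofList ((PySem.Dict.values d).flatMap (fun cs => cs))
  decide ((PySem.Dict.keys d).countP (fun k => !(PySem.Set.contains children k)) = 1)

-- ===== PRECONDITION & SPEC =====
def Spec_is_valid_git_tree (tree_map : List (String × List String)) (out : Bool) : Prop := out = is_valid_git_tree_alt tree_map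
instance (tree_map : List (String × List String)) (out : Bool) : Decidable (Spec_is_valid_git_tree tree_map out) := by unfold Spec_is_valid_git_tree; infer_instance

-- ===== CLAIM (what is proved, stated in full; the proofs are below) =====
def Claim_equal_is_valid_git_tree : Prop := ∀ (tree_map : List (String × List String)), Dom_is_valid_git_tree tree_map → Spec_is_valid_git_tree tree_map (is_valid_git_tree tree_map)

-- ===== LEMMAS AND PROOFS =====

-- A's child set and root list, named for the proofs
def pvChildSet (tree_map : List (String × List String)) : PySem.Set String :=
  (PySem.Dict.values (PySem.Dict.ofList tree_map)).foldl
    (fun s children => children.foldl PySem.Set.add s) PySem.Set.empty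

def pvRoots (tree_map : List (String × List String)) : List String :=
  (PySem.Dict.keys (PySem.Dict.ofList tree_map)).filter
    (fun k => !(PySem.Set.contains (pvChildSet tree_map) k))

-- membership in A's doubly-folded child set
theorem mem_pvChildSet (tree_map : List (String × List String)) (y : String) :
    y ∈ pvChildSet tree_map ↔ ∃ cs ∈ PySem.Dict.values (PySem.Dict.ofList tree_map), y ∈ cs := by
  unfold pvChildSet
  generalize PySem.Dict.values (PySem.Dict.ofList tree_map) = vs
  suffices h : ∀ s : PySem.Set String,
      y ∈ vs.foldl (fun s children => children.foldl PySem.Set.add s) s ↔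
        y ∈ s ∨ ∃ cs ∈ vs, y ∈ cs by
    rw [h PySem.Set.empty]; simp [PySem.Set.empty]
  induction vs with
  | nil => simp
  | cons cs rest ih =>
      intro s
      simp only [List.foldl_cons, ih]
      have h2 : y ∈ cs.foldl PySem.Set.add s ↔ y ∈ s ∨ ∃ b ∈ cs, y = b := by
        simpa using PySem.Set.mem_foldl_add (f := fun x : String => x) (l := cs) (s := s) (y := y)
      rw [h2]
      constructor
      · rintro ((h | ⟨b, hb, rfl⟩) | ⟨l, hl, hy⟩)
        · exact Or.inl h
        · exact Or.inr ⟨cs, by simp, hb⟩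
        · exact Or.inr ⟨l, by simp [hl], hy⟩
      · rintro (h | ⟨l, hl, hy⟩)
        · exact Or.inl (Or.inl h)
        · rcases List.mem_cons.mp hl with rfl | hl'
          · exact Or.inl (Or.inr ⟨y, hy, rfl⟩)
          · exact Or.inr ⟨l, hl', hy⟩

-- A's root set IS the filtered key list
theorem diff_eq_pvRoots (tree_map : List (String × List String)) :
    PySem.Set.diff (PySem.Set.ofList (PySem.Dict.keys (PySem.Dict.ofList tree_map)))
      (pvChildSet tree_map) = pvRoots tree_map := by
  rw [PySem.Set.ofList_eq_self_of_nodup _ (PySem.Dict.nodup_keys_ofList tree_map)]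
  unfold pvRoots
  simp [PySem.Set.diff]

-- A's dfs called on a node already in `visited` returns False without touching the state.
theorem pvDfsA_stuck (d : PySem.Dict String (List String)) (fuel : Nat) (node : String)
    (visited gv : PySem.Set String) (h : PySem.Set.contains visited node = true) :
    pvDfsA d fuel node visited gv = (false, visited, gv) := by
  cases fuel with
  | zero => simp [pvDfsA]
  | succ n => simp [pvDfsA, (PySem.Set.contains_iff visited node).mp h]

-- A's child loop with `node ∈ visited` and no child in `visited` runs to completion unchanged.
theorem pvDfsLoopA_clean (d : PySem.Dict String (List String)) (fuel : Nat) (node : String)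
    (children : List String) (visited gv : PySem.Set String)
    (hn : PySem.Set.contains visited node = true)
    (hc : ∀ c ∈ children, PySem.Set.contains visited c = false) :
    pvDfsLoopA d fuel node children visited gv = (none, visited, gv) := by
  induction children with
  | nil => simp [pvDfsLoopA]
  | cons c cs ih =>
      have h1 : PySem.Set.contains visited c = false := hc c (by simp)
      simp only [pvDfsLoopA, h1, Bool.false_eq_true, if_false,
        pvDfsA_stuck d fuel node visited gv hn]
      exact ih (fun x hx => hc x (by simp [hx]))

-- when `start` is a root, A's dfs returns True (the recursion is a no-op)
theorem pvDfsA_of_root (tree_map : List (String × List String)) (fuel : Nat) (start : String)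
    (hstart : start ∈ pvRoots tree_map) :
    (pvDfsA (PySem.Dict.ofList tree_map) (fuel + 1) start PySem.Set.empty PySem.Set.empty).1
      = true := by
  have hmem := List.mem_filter.mp hstart
  have hkey : start ∈ PySem.Dict.keys (PySem.Dict.ofList tree_map) := hmem.1
  have hnotchild : start ∉ pvChildSet tree_map := by
    simpa using hmem.2
  have hsn : PySem.Set.contains (PySem.Set.add PySem.Set.empty start) start = true :=
    (PySem.Set.contains_iff _ _).mpr ((PySem.Set.mem_add _ _ _).mpr (Or.inr rfl))
  have hchild : ∀ c ∈ PySem.Dict.getD (PySem.Dict.ofList tree_map) start [],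
      PySem.Set.contains (PySem.Set.add PySem.Set.empty start) c = false := by
    intro c hc
    have hvals := PySem.Dict.values_eq_map_keys (PySem.Dict.ofList tree_map)
      (PySem.Dict.nodup_keys_ofList tree_map) []
    have hin : PySem.Dict.getD (PySem.Dict.ofList tree_map) start []
        ∈ PySem.Dict.values (PySem.Dict.ofList tree_map) := by
      rw [hvals]; exact List.mem_map.mpr ⟨start, hkey, rfl⟩
    have hcS : c ∈ pvChildSet tree_map := (mem_pvChildSet tree_map c).mpr ⟨_, hin, hc⟩
    have hcne : c ≠ start := by rintro rfl; exact hnotchild hcS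
    have hnot : c ∉ PySem.Set.add PySem.Set.empty start := by
      rw [PySem.Set.mem_add]
      rintro (h | h)
      · simp [PySem.Set.empty] at h
      · exact hcne h
    simpa using hnot
  rw [pvDfsA]
  have he : PySem.Set.contains (PySem.Set.empty : PySem.Set String) start = false := rfl
  rw [he]
  simp only [Bool.false_eq_true, if_false]
  rw [pvDfsLoopA_clean _ fuel start _ _ _ hsn hchild]

-- A computes `length (pvRoots) == 1`
theorem is_valid_git_tree_eq (tree_map : List (String × List String)) :
    is_valid_git_tree tree_map = decide ((pvRoots tree_map).length = 1) := by
  unfold is_valid_git_tree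
  simp only []
  rw [show (PySem.Dict.values (PySem.Dict.ofList tree_map)).foldl
      (fun s children => children.foldl PySem.Set.add s) PySem.Set.empty
      = pvChildSet tree_map from rfl, diff_eq_pvRoots]
  cases h : pvRoots tree_map with
  | nil => simp [PySem.Set.len]
  | cons start rest =>
      cases rest with
      | nil =>
          have h1 : start ∈ pvRoots tree_map := by rw [h]; simp
          have h2 := pvDfsA_of_root tree_map tree_map.length start h1
          simp [PySem.Set.len]
          exact h2
      | cons b bs =>
          simp [PySem.Set.len]
          intro hc
          exfalso
          omega

-- B computes the same count
theorem is_valid_git_tree_alt_eq (tree_map : List (String × List String)) :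
    is_valid_git_tree_alt tree_map = decide ((pvRoots tree_map).length = 1) := by
  unfold is_valid_git_tree_alt
  simp only []
  unfold pvRoots
  rw [← List.countP_eq_length_filter]
  congr 2
  apply List.countP_congr
  intro k _
  have hiff : (k ∈ PySem.Set.ofList ((PySem.Dict.values (PySem.Dict.ofList tree_map)).flatMap
      (fun cs => cs))) ↔ k ∈ pvChildSet tree_map := by
    rw [PySem.Set.mem_ofList, List.mem_flatMap, mem_pvChildSet]
  by_cases hk : k ∈ pvChildSet tree_map
  · rw [(PySem.Set.contains_iff _ _).mpr hk, (PySem.Set.contains_iff _ _).mpr (hiff.mpr hk)]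
  · have h1 : PySem.Set.contains (pvChildSet tree_map) k = false := by simpa using hk
    have h2 : PySem.Set.contains (PySem.Set.ofList
        ((PySem.Dict.values (PySem.Dict.ofList tree_map)).flatMap (fun cs => cs))) k = false := by
      simpa using (fun h => hk (hiff.mp h))
    rw [h1, h2]

-- ===== VERDICT (by name: the statement is the Claim_ definition above) =====
theorem is_valid_git_tree_spec : Claim_equal_is_valid_git_tree := by
  intro tree_map _
  unfold Spec_is_valid_git_tree
  rw [is_valid_git_tree_eq, is_valid_git_tree_alt_eq]
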